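-- pv_equiv track=rewrite | github.com/ajdgg/LIB-Righttopicons | main.py | find_nearest_index
-- ===== SOURCE A (Python) =====
-- from typing import List
--
-- def find_nearest_index(list1: List[str], list2: List[str]):
--     min_index_diff = len(list1)
--     nearest_element = None
--
--     for element in list2:
--         try:
--             index = list1.index(element)
--             if index < min_index_diff:
--                 min_index_diff = index
--                 nearest_element = element
--         except ValueError:
--             pass
--
--     return nearest_element
-- ===== SOURCE B (Python) =====
-- def find_nearest_index(list1, list2):
--     targets = set(list2)
--     for element in list1:
--         if element in targets:
--             return element
--     return None
-- ===== Notes on version B (the rewrite author's own statement) =====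
-- stated objective: faster
-- what changed: Replaces the nested loop (for each list2 element, linear-search list1 with list.index and track the minimum index, with try/except) by a single forward scan of list1 against a membership set built once from list2, returning the first hit.
import Mathlib
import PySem

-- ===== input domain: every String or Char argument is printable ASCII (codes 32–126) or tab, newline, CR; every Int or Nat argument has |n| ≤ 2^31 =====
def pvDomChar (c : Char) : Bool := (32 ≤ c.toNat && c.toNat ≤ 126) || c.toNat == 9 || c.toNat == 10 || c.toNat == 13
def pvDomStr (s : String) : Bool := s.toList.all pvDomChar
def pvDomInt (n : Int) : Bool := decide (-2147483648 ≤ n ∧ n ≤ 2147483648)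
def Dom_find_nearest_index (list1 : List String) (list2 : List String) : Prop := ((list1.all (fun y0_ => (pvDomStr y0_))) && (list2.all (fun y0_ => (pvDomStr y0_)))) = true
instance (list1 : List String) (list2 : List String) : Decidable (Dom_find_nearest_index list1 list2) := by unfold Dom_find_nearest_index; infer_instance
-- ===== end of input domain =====

-- B replaces A's nested min-index search with a single forward scan of list1
-- against a membership set built once from list2 (objective: faster, O(n+m) vs O(n*m)).

-- ===== PORT A =====
-- fold over list2 carrying (min_index_diff, nearest_element); list1.index → PySem.List.index?,
-- the ValueError branch of try/except is the `none` case.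
def find_nearest_index (list1 : List String) (list2 : List String) : Option String :=
  (list2.foldl (fun s element =>
    match PySem.List.index? list1 element with
    | some index => if index < s.1 then (index, some element) else s
    | none => s) (list1.length, (none : Option String))).2

-- ===== PORT B =====
-- early-returning for-loop over list1 → structural recursion with the set as parameter
def fniScan (targets : PySem.Set String) : List String → Option String
  | [] => none
  | element :: rest =>
      if targets.contains element then some element else fniScan targets rest

def find_nearest_index_alt (list1 : List String) (list2 : List String) : Option String :=
  fniScan (PySem.Set.ofList list2) list1

-- ===== PRECONDITION & SPEC =====
def Spec_find_nearest_index (list1 : List String) (list2 : List String) (out : Option String) : Prop := out = find_nearest_index_alt list1 list2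
instance (list1 : List String) (list2 : List String) (out : Option String) : Decidable (Spec_find_nearest_index list1 list2 out) := by unfold Spec_find_nearest_index; infer_instance

-- ===== CLAIM (what is proved, stated in full; the proofs are below) =====
def Claim_equal_find_nearest_index : Prop := ∀ (list1 : List String) (list2 : List String), Dom_find_nearest_index list1 list2 → Spec_find_nearest_index list1 list2 (find_nearest_index list1 list2)

-- ===== LEMMAS AND PROOFS =====

-- the indices of list1 that A's loop ever compares: first occurrences of list2 elements
def fniIdxs (list1 list2 : List String) : List Nat :=
  list2.filterMap (fun e => List.idxOf? e list1)

theorem fniScan_eq_find? (t : PySem.Set String) (l : List String) :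
    fniScan t l = l.find? (fun x => t.contains x) := by
  induction l with
  | nil => rfl
  | cons x xs ih => simp [fniScan, List.find?, ih]; split <;> simp_all

theorem foldl_min_le {L : List Nat} {a : Nat} : L.foldl min a ≤ a := by
  induction L generalizing a with
  | nil => simp
  | cons x xs ih => exact le_trans ih (Nat.min_le_left a x)

theorem foldl_min_mem {L : List Nat} {a : Nat} : L.foldl min a = a ∨ L.foldl min a ∈ L := by
  induction L generalizing a with
  | nil => simp
  | cons x xs ih =>
    rcases ih (a := min a x) with h | h
    · by_cases hax : a ≤ x
      · left; simpa [Nat.min_eq_left hax] using h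
      · right
        rw [List.foldl_cons, h, Nat.min_eq_right (by omega)]
        exact List.mem_cons_self
    · right; exact List.mem_cons_of_mem _ (by simpa using h)

theorem foldl_min_le_mem {L : List Nat} {a x : Nat} (hx : x ∈ L) : L.foldl min a ≤ x := by
  induction L generalizing a with
  | nil => simp at hx
  | cons y ys ih =>
    rw [List.foldl_cons]
    rcases List.mem_cons.mp hx with rfl | hx
    · exact le_trans foldl_min_le (Nat.min_le_right a x)
    · exact ih hx

-- characterization of A's fold from an arbitrary state
theorem fniFold_char (l1 l2 : List String) : ∀ (m : Nat) (r : Option String),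
    (l2.foldl (fun s element =>
      match PySem.List.index? l1 element with
      | some index => if index < s.1 then (index, some element) else s
      | none => s) (m, r))
    = ((fniIdxs l1 l2).foldl min m,
       if (fniIdxs l1 l2).foldl min m < m then l1[(fniIdxs l1 l2).foldl min m]? else r) := by
  induction l2 with
  | nil => intro m r; simp [fniIdxs]
  | cons e l2 ih =>
    intro m r
    simp only [PySem.List.index?] at ih
    simp only [List.foldl_cons, PySem.List.index?]
    rcases h : List.idxOf? e l1 with _ | i
    · simpa [fniIdxs, List.filterMap_cons, h] using ih m r
    · have hget : l1[i]? = some e := by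
        rcases List.idxOf?_eq_some_iff.mp h with ⟨hlt, heq, _⟩
        simp [List.getElem?_eq_getElem hlt, heq]
      by_cases him : i < m
      · simp only [if_pos him]
        rw [ih i (some e)]
        have hmin : min m i = i := Nat.min_eq_right (Nat.le_of_lt him)
        simp only [fniIdxs, List.filterMap_cons, h, List.foldl_cons, hmin]
        have hble : (fniIdxs l1 l2).foldl min i ≤ i := foldl_min_le
        by_cases hb : (fniIdxs l1 l2).foldl min i < i
        · simp [fniIdxs] at hb ⊢
          simp [hb, Nat.lt_trans hb him]
        · have heqb : (fniIdxs l1 l2).foldl min i = i :=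
            Nat.le_antisymm hble (Nat.le_of_not_lt hb)
          simp [fniIdxs] at heqb ⊢
          simp [heqb, him, hget]
      · simp only [if_neg him]
        rw [ih m r]
        have hmin : min m i = m := Nat.min_eq_left (Nat.le_of_not_lt him)
        simp [fniIdxs, h, hmin]

-- members of fniIdxs are first-occurrence indices of list2-elements
theorem mem_fniIdxs {l1 l2 : List String} {i : Nat} (h : i ∈ fniIdxs l1 l2) :
    ∃ hlt : i < l1.length, l1[i] ∈ l2 := by
  rcases List.mem_filterMap.mp h with ⟨e, he, hidx⟩
  rcases List.idxOf?_eq_some_iff.mp hidx with ⟨hlt, heq, _⟩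
  exact ⟨hlt, by rwa [heq]⟩

-- the index of the first list1-element lying in list2 is a member of fniIdxs
theorem findIdx_mem_fniIdxs {l1 l2 : List String} {i : Nat} (hlt : i < l1.length)
    (hmem : l1[i] ∈ l2) (hmin : ∀ j (hj : j < i), l1[j]'(Nat.lt_trans hj hlt) ∉ l2) :
    i ∈ fniIdxs l1 l2 := by
  refine List.mem_filterMap.mpr ⟨l1[i], hmem, ?_⟩
  rcases hk : List.idxOf? l1[i] l1 with _ | k
  · exact absurd (List.getElem_mem hlt) (List.idxOf?_eq_none_iff.mp hk)
  · rcases List.idxOf?_eq_some_iff.mp hk with ⟨hklt, hkeq, hkfirst⟩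
    by_cases hki : k < i
    · exact absurd (hkeq ▸ hmem) (hmin k hki)
    · by_cases hik : i < k
      · exact absurd rfl (hkfirst i hik)
      · have hkeqi : k = i := Nat.le_antisymm (Nat.le_of_not_lt hik) (Nat.le_of_not_lt hki)
        exact congrArg some hkeqi

theorem find_nearest_index_eq_find? (l1 l2 : List String) :
    find_nearest_index l1 l2 = l1.find? (fun x => decide (x ∈ l2)) := by
  unfold find_nearest_index
  rw [fniFold_char]
  set b := (fniIdxs l1 l2).foldl min l1.length with hbdef
  rcases hf : l1.find? (fun x => decide (x ∈ l2)) with _ | x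
  · -- no list1 element is in list2 ⇒ fniIdxs is empty ⇒ b = length
    have hnone : ∀ i (hi : i < l1.length), l1[i] ∉ l2 := by
      intro i hi hmem
      have := List.find?_eq_none.mp hf l1[i] (List.getElem_mem hi)
      simp at this; exact this hmem
    have hempty : fniIdxs l1 l2 = [] := by
      rcases he : fniIdxs l1 l2 with _ | ⟨j, L⟩
      · rfl
      · rcases mem_fniIdxs (he ▸ List.mem_cons_self) with ⟨hj, hjm⟩
        exact absurd hjm (hnone j hj)
    simp [hbdef, hempty]
  · -- first match at index i
    rcases List.find?_eq_some_iff_getElem.mp hf with ⟨hp, i, hi, heq, hfirst⟩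
    have hmem : l1[i] ∈ l2 := by simpa [heq] using of_decide_eq_true hp
    have hmini : ∀ j (hj : j < i), l1[j]'(Nat.lt_trans hj hi) ∉ l2 := by
      intro j hj hmemj
      have := hfirst j hj
      simp at this; exact this hmemj
    have hiMem : i ∈ fniIdxs l1 l2 := findIdx_mem_fniIdxs hi hmem hmini
    have hble : b ≤ i := foldl_min_le_mem hiMem
    have hblen : b < l1.length := Nat.lt_of_le_of_lt hble hi
    have hbi : b = i := by
      rcases foldl_min_mem (L := fniIdxs l1 l2) (a := l1.length) with h | h
      · omega
      · rcases mem_fniIdxs h with ⟨hbl, hbm⟩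
        by_cases hlt : b < i
        · exact absurd hbm (hmini b hlt)
        · omega
    simp only [hbi, List.getElem?_eq_getElem hi, heq, if_pos hi]

theorem find_nearest_index_alt_eq_find? (l1 l2 : List String) :
    find_nearest_index_alt l1 l2 = l1.find? (fun x => decide (x ∈ l2)) := by
  unfold find_nearest_index_alt
  rw [fniScan_eq_find?]
  congr 1
  funext x
  by_cases hm : x ∈ l2
  · simp [hm]
  · have hnm : ¬ x ∈ PySem.Set.ofList l2 := fun hc => hm ((PySem.Set.mem_ofList l2 x).mp hc)
    have hc : (PySem.Set.ofList l2).contains x = false := by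
      rcases hcc : (PySem.Set.ofList l2).contains x with _ | _
      · rfl
      · exact absurd ((PySem.Set.contains_iff _ _).mp hcc) hnm
    simp [hm]

-- ===== VERDICT (by name: the statement is the Claim_ definition above) =====
theorem find_nearest_index_spec : Claim_equal_find_nearest_index := by
  intro l1 l2 _
  unfold Spec_find_nearest_index
  rw [find_nearest_index_eq_find?, find_nearest_index_alt_eq_find?]
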